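-- pv_equiv track=rewrite | github.com/YassineTemessek/Juthoor-Linguistic-Genealogy | Juthoor-CognateDiscovery-LV2/scripts/discovery/run_eye1_full_scale.py | ordered_overlap
-- ===== SOURCE A (Python) =====
-- def ordered_overlap(skel_a: str, skel_b: str) -> list[str]:
--     """Find consonants appearing in both skeletons in the same relative order.
--
--     Uses a greedy left-to-right scan. Returns matching consonants in order.
--     """
--     j = 0
--     matches: list[str] = []
--     for ch in skel_a:
--         while j < len(skel_b):
--             if skel_b[j] == ch:
--                 matches.append(ch)
--                 j += 1
--                 break
--             j += 1
--     return matches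
-- ===== SOURCE B (Python) =====
-- def _lower_bound(idxs, j):
--     """First position in the ascending list idxs whose value is >= j (binary search)."""
--     lo, hi = 0, len(idxs)
--     while lo < hi:
--         mid = (lo + hi) // 2
--         if idxs[mid] < j:
--             lo = mid + 1
--         else:
--             hi = mid
--     return lo
--
--
-- def ordered_overlap(skel_a: str, skel_b: str) -> list[str]:
--     """Find consonants appearing in both skeletons in the same relative order.
--
--     Index skel_b once (char -> ascending occurrence positions), then binary-search
--     each char of skel_a for its first occurrence at or after the moving cursor.
--     """
--     pos = {}
--     for i, c in enumerate(skel_b):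
--         pos.setdefault(c, []).append(i)
--     matches = []
--     j = 0
--     for ch in skel_a:
--         idxs = pos.get(ch, [])
--         k = _lower_bound(idxs, j)
--         if k == len(idxs):
--             break
--         matches.append(ch)
--         j = idxs[k] + 1
--     return matches
-- ===== Notes on version B (the rewrite author's own statement) =====
-- stated objective: alternative
-- what changed: Replaces A's per-character linear scan of skel_b with a one-pass occurrence index of skel_b (char -> ascending position list) queried by binary search against a moving cursor, breaking out on the first unmatchable char.
import Mathlib
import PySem

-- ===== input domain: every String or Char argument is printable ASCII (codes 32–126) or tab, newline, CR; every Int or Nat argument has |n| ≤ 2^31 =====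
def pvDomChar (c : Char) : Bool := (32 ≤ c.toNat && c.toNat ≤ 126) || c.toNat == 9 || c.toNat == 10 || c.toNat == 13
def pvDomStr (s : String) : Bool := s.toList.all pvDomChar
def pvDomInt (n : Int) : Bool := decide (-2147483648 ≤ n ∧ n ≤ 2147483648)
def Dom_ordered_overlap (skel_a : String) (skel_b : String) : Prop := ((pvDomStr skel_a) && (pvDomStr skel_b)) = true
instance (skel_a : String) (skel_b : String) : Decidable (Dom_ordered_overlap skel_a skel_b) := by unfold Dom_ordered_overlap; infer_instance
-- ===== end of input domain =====

-- B replaces A's forward scan of skel_b with a precomputed occurrence index queried by binary search (alternative decomposition, same results).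

-- ===== PORT A =====
-- the inner 'while j < len(skel_b): …' loop: returns (new j, whether ch was matched)
def innerA (b : List Char) (ch : Char) (j : Nat) : Nat × Bool :=
  if h : j < b.length then
    if b[j] = ch then (j + 1, true) else innerA b ch (j + 1)
  else (j, false)
termination_by b.length - j

-- the outer 'for ch in skel_a' loop, building matches
def loopA (b : List Char) : List Char → Nat → List String
  | [], _ => []
  | ch :: rest, j =>
    let r := innerA b ch j
    if r.2 then String.ofList [ch] :: loopA b rest r.1 else loopA b rest r.1

def ordered_overlap (skel_a : String) (skel_b : String) : List String :=
  loopA skel_b.toList skel_a.toList 0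

-- ===== PORT B =====
-- Source B's _lower_bound: first position in ascending idxs with value ≥ j (binary search)
def lowerBound (idxs : List Int) (j : Int) (lo hi : Nat) : Nat :=
  if _h : lo < hi then
    let mid := (lo + hi) / 2
    if idxs.getD mid 0 < j then lowerBound idxs j (mid + 1) hi
    else lowerBound idxs j lo mid
  else lo
termination_by hi - lo
decreasing_by all_goals omega

-- 'for i, c in enumerate(skel_b): pos.setdefault(c, []).append(i)'
def buildPos (b : List Char) : PySem.Dict Char (List Int) :=
  (PySem.List.enumerate b 0).foldl (fun d p => d.modify p.2 [] (· ++ [p.1])) PySem.Dict.empty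

-- the 'for ch in skel_a' loop of Source B (break = return what was collected)
def loopB (pos : PySem.Dict Char (List Int)) : List Char → Int → List String
  | [], _ => []
  | ch :: rest, j =>
    let idxs := pos.getD ch []
    let k := lowerBound idxs j 0 idxs.length
    if k = idxs.length then []
    else String.ofList [ch] :: loopB pos rest (idxs.getD k 0 + 1)

def ordered_overlap_alt (skel_a : String) (skel_b : String) : List String :=
  loopB (buildPos skel_b.toList) skel_a.toList 0

-- ===== PRECONDITION & SPEC =====
def Spec_ordered_overlap (skel_a : String) (skel_b : String) (out : List String) : Prop := out = ordered_overlap_alt skel_a skel_b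
instance (skel_a : String) (skel_b : String) (out : List String) : Decidable (Spec_ordered_overlap skel_a skel_b out) := by unfold Spec_ordered_overlap; infer_instance

-- ===== CLAIM (what is proved, stated in full; the proofs are below) =====
def Claim_equal_ordered_overlap : Prop := ∀ (skel_a : String) (skel_b : String), Dom_ordered_overlap skel_a skel_b → Spec_ordered_overlap skel_a skel_b (ordered_overlap skel_a skel_b)

-- ===== LEMMAS AND PROOFS =====

-- occurrence positions of c in b, ascending (what buildPos stores per char)
def occs (b : List Char) (c : Char) : List Int :=
  ((PySem.List.enumerate b 0).filter (fun p => p.2 == c)).map (·.1)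

lemma getD_buildPos (b : List Char) (c : Char) : (buildPos b).getD c [] = occs b c := by
  have h : buildPos b = ((PySem.List.enumerate b 0).map Prod.swap).foldl
      (fun d p => d.modify p.1 [] (· ++ [p.2])) PySem.Dict.empty := by
    rw [List.foldl_map]; rfl
  rw [h, PySem.Dict.getD_foldl_modify_append]
  simp [occs, List.filter_map, List.map_map, Function.comp_def]

lemma occs_pairwise_lt (b : List Char) (c : Char) : (occs b c).Pairwise (· < ·) :=
  ((PySem.List.pairwise_lt_enumerate b 0).filter _).map _ (by intro a b h; exact h)

lemma mem_occs_iff (b : List Char) (c : Char) (x : Int) :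
    x ∈ occs b c ↔ ∃ (k : Nat) (hk : k < b.length), x = (k : Int) ∧ b[k] = c := by
  simp only [occs, List.mem_map, List.mem_filter, PySem.List.mem_enumerate_iff]
  constructor
  · rintro ⟨p, ⟨⟨k, hk, rfl⟩, hc⟩, rfl⟩
    refine ⟨k, hk, by simp, by simpa using hc⟩
  · rintro ⟨k, hk, rfl, hc⟩
    exact ⟨((0:Int) + (k:Int), b[k]), ⟨⟨k, hk, rfl⟩, by simpa using hc⟩, by simp⟩

lemma getD_mono (idxs : List Int) (hs : idxs.Pairwise (· ≤ ·)) (s t : Nat)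
    (hst : s ≤ t) (ht : t < idxs.length) : idxs.getD s 0 ≤ idxs.getD t 0 := by
  rcases eq_or_lt_of_le hst with rfl | h
  · exact le_refl _
  · rw [List.getD_eq_getElem _ _ (lt_trans h ht), List.getD_eq_getElem _ _ ht]
    exact (List.pairwise_iff_getElem.mp hs) s t _ _ h

lemma lowerBound_spec (idxs : List Int) (j : Int) (hs : idxs.Pairwise (· ≤ ·)) :
    ∀ lo hi, lo ≤ hi → hi ≤ idxs.length →
      (∀ m < lo, idxs.getD m 0 < j) →
      (hi < idxs.length → j ≤ idxs.getD hi 0) →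
      lo ≤ lowerBound idxs j lo hi ∧ lowerBound idxs j lo hi ≤ hi ∧
      (∀ m < lowerBound idxs j lo hi, idxs.getD m 0 < j) ∧
      (lowerBound idxs j lo hi < idxs.length → j ≤ idxs.getD (lowerBound idxs j lo hi) 0) := by
  suffices H : ∀ n lo hi, hi - lo ≤ n → lo ≤ hi → hi ≤ idxs.length →
      (∀ m < lo, idxs.getD m 0 < j) →
      (hi < idxs.length → j ≤ idxs.getD hi 0) →
      lo ≤ lowerBound idxs j lo hi ∧ lowerBound idxs j lo hi ≤ hi ∧
      (∀ m < lowerBound idxs j lo hi, idxs.getD m 0 < j) ∧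
      (lowerBound idxs j lo hi < idxs.length → j ≤ idxs.getD (lowerBound idxs j lo hi) 0) by
    intro lo hi h1 h2 h3 h4
    exact H (hi - lo) lo hi le_rfl h1 h2 h3 h4
  intro n
  induction n with
  | zero =>
    intro lo hi hf h1 h2 h3 h4
    have : lo = hi := by omega
    subst this
    rw [lowerBound]
    simp only [lt_irrefl, dite_false]
    exact ⟨le_rfl, le_rfl, h3, h4⟩
  | succ n ih =>
    intro lo hi hf h1 h2 h3 h4
    rw [lowerBound]
    by_cases hlt : lo < hi
    · simp only [hlt, dite_true]
      set mid := (lo + hi) / 2 with hmid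
      have hm1 : lo ≤ mid := by omega
      have hm2 : mid < hi := by omega
      by_cases hc : idxs.getD mid 0 < j
      · simp only [hc, if_true]
        have h3' : ∀ m < mid + 1, idxs.getD m 0 < j := by
          intro m hm
          by_cases hmlo : m < lo
          · exact h3 m hmlo
          · exact lt_of_le_of_lt (getD_mono idxs hs m mid (by omega) (by omega)) hc
        obtain ⟨a1, a2, a3, a4⟩ := ih (mid + 1) hi (by omega) (by omega) h2 h3' h4
        exact ⟨by omega, a2, a3, a4⟩
      · simp only [hc, if_false]
        have h4' : mid < idxs.length → j ≤ idxs.getD mid 0 := fun _ => le_of_not_gt hc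
        obtain ⟨a1, a2, a3, a4⟩ := ih lo mid (by omega) (by omega) (by omega) h3 h4'
        exact ⟨a1, by omega, a3, a4⟩
    · simp only [hlt, dite_false]
      have : lo = hi := by omega
      subst this
      exact ⟨le_rfl, le_rfl, h3, h4⟩

lemma innerA_none (b : List Char) (ch : Char) (j : Nat) (hjb : j ≤ b.length)
    (h : ∀ m, j ≤ m → ∀ hm : m < b.length, b[m] ≠ ch) :
    innerA b ch j = (b.length, false) := by
  suffices H : ∀ n j, b.length - j ≤ n → j ≤ b.length →
      (∀ m, j ≤ m → ∀ hm : m < b.length, b[m] ≠ ch) →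
      innerA b ch j = (b.length, false) from H (b.length - j) j le_rfl hjb h
  intro n
  induction n with
  | zero =>
    intro j hf hle _
    rw [innerA]
    have : ¬ j < b.length := by omega
    simp [this]
    omega
  | succ n ih =>
    intro j hf hle hnone
    rw [innerA]
    by_cases hj : j < b.length
    · simp only [hj, dite_true]
      rw [if_neg (hnone j le_rfl hj)]
      exact ih (j + 1) (by omega) (by omega) (fun m hm => hnone m (by omega))
    · simp [hj]
      omega

lemma innerA_found (b : List Char) (ch : Char) (j k0 : Nat) (hj : j ≤ k0)
    (hk : k0 < b.length) (hc : b[k0] = ch)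
    (hmin : ∀ m, j ≤ m → m < k0 → ∀ hm : m < b.length, b[m] ≠ ch) :
    innerA b ch j = (k0 + 1, true) := by
  suffices H : ∀ n j, k0 - j ≤ n → j ≤ k0 →
      (∀ m, j ≤ m → m < k0 → ∀ hm : m < b.length, b[m] ≠ ch) →
      innerA b ch j = (k0 + 1, true) from H (k0 - j) j le_rfl hj hmin
  intro n
  induction n with
  | zero =>
    intro j hf hj' _
    have : j = k0 := by omega
    subst this
    rw [innerA]
    simp [hk, hc]
  | succ n ih =>
    intro j hf hj' hmin'
    rcases eq_or_lt_of_le hj' with rfl | hlt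
    · rw [innerA]; simp [hk, hc]
    · rw [innerA]
      have hjb : j < b.length := by omega
      simp only [hjb, dite_true]
      rw [if_neg (hmin' j le_rfl hlt hjb)]
      exact ih (j + 1) (by omega) (by omega) (fun m hm => hmin' m (by omega))

lemma loopA_exhaust (b : List Char) (l : List Char) : loopA b l b.length = [] := by
  induction l with
  | nil => rfl
  | cons ch rest ih =>
    have hr : innerA b ch b.length = (b.length, false) := by
      rw [innerA]; simp
    simp [loopA, hr, ih]

lemma loop_eq (b : List Char) (l : List Char) :
    ∀ j : Nat, j ≤ b.length → loopA b l j = loopB (buildPos b) l (j : Int) := by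
  induction l with
  | nil => intro j _; rfl
  | cons ch rest ih =>
    intro j hjb
    simp only [loopA, loopB, getD_buildPos]
    have hple : (occs b ch).Pairwise (· ≤ ·) := (occs_pairwise_lt b ch).imp le_of_lt
    obtain ⟨s1, s2, s3, s4⟩ := lowerBound_spec (occs b ch) (j : Int) hple 0 (occs b ch).length
      (Nat.zero_le _) le_rfl (by omega) (fun h => absurd h (lt_irrefl _))
    set idxs := occs b ch with hidxs
    set k := lowerBound idxs (j : Int) 0 idxs.length with hkdef
    by_cases hk : k = idxs.length
    · -- no occurrence of ch at or after j: A exhausts skel_b, B breaks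
      have hA : innerA b ch j = (b.length, false) := by
        apply innerA_none b ch j hjb
        intro m hm hmb hceq
        have hx : ((m : Nat) : Int) ∈ idxs := (mem_occs_iff b ch _).mpr ⟨m, hmb, rfl, hceq⟩
        obtain ⟨t, ht, hteq⟩ := List.getElem_of_mem hx
        have h3 := s3 t (by omega)
        rw [List.getD_eq_getElem _ _ ht, hteq] at h3
        omega
      rw [if_pos hk, hA]
      simpa using loopA_exhaust b rest
    · -- first occurrence of ch at position idxs[k] = k0 ≥ j
      have hklen : k < idxs.length := by omega
      have hx : idxs.getD k 0 ∈ idxs := by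
        rw [List.getD_eq_getElem _ _ hklen]; exact List.getElem_mem _
      obtain ⟨k0, hk0b, hxeq, hc⟩ := (mem_occs_iff b ch _).mp hx
      have hjk0 : (j : Int) ≤ (k0 : Int) := by rw [← hxeq]; exact s4 hklen
      have hmin : ∀ m, j ≤ m → m < k0 → ∀ hm : m < b.length, b[m] ≠ ch := by
        intro m h1 h2 hm hceq
        have hxm : ((m : Nat) : Int) ∈ idxs := (mem_occs_iff b ch _).mpr ⟨m, hm, rfl, hceq⟩
        obtain ⟨t, ht, hteq⟩ := List.getElem_of_mem hxm
        have htk : t < k := by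
          by_contra hge
          have hmono := getD_mono idxs hple k t (by omega) ht
          rw [List.getD_eq_getElem _ _ ht, hteq, hxeq] at hmono
          omega
        have h3 := s3 t htk
        rw [List.getD_eq_getElem _ _ ht, hteq] at h3
        omega
      have hA : innerA b ch j = (k0 + 1, true) :=
        innerA_found b ch j k0 (by omega) hk0b hc hmin
      rw [if_neg hk, hA]
      simp only [hxeq]
      have := ih (k0 + 1) (by omega)
      push_cast at this ⊢
      rw [this]

-- ===== VERDICT (by name: the statement is the Claim_ definition above) =====
theorem ordered_overlap_spec : Claim_equal_ordered_overlap := by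
  intro a b _
  unfold Spec_ordered_overlap ordered_overlap ordered_overlap_alt
  exact loop_eq b.toList a.toList 0 (Nat.zero_le _)
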